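-- pv_equiv track=rewrite | github.com/mttue7/EscalonamentoPY | Escalonamento.py | menorValorComp
-- ===== SOURCE A (Python) =====
-- def menorValorComp(vetor,valorComparado):
--     menorValor = 0
--     while(vetor[menorValor]<valorComparado):
--         menorValor += 1
--
--     for i in range(menorValor,len(vetor)):
--         if(vetor[i]<=vetor[menorValor] and vetor[i] >= valorComparado):
--             menorValor = i
--     return menorValor
-- ===== SOURCE B (Python) =====
-- def menorValorComp(vetor, valorComparado):
--     m = min(v for v in vetor if v >= valorComparado)
--     return len(vetor) - 1 - vetor[::-1].index(m)
-- ===== Notes on version B (the rewrite author's own statement) =====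
-- stated objective: simpler
-- what changed: Replaces A's while-scan plus index-tracking for-loop by a direct computation: take the minimum of the values >= valorComparado and return the last index holding it via .index on the reversed list.
import Mathlib
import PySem

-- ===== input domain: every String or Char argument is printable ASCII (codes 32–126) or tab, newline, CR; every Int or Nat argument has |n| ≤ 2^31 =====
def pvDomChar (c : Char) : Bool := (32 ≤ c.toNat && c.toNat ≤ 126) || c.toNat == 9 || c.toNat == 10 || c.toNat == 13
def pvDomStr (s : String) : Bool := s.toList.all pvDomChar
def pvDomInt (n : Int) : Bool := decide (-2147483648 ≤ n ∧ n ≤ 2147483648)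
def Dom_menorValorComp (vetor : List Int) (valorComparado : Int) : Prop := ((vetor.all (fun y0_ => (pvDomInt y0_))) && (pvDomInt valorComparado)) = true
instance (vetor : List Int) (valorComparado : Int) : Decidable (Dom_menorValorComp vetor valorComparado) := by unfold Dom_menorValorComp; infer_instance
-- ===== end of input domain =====

-- B replaces A's while-scan + index fold by "minimum of the qualifying values, then the last
-- index of that minimum via reversed .index"; objective: simpler.

-- ===== PORT A =====
-- the while loop: advance until vetor[menorValor] >= valorComparado; running off the end is
-- Python's IndexError, excluded by Pre_ (the out-of-range branch is unreached under Pre_)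
def menorValorCompWhile (vetor : List Int) (valorComparado : Int) (menorValor : Nat) : Nat :=
  if h : menorValor < vetor.length then
    if vetor[menorValor] < valorComparado then
      menorValorCompWhile vetor valorComparado (menorValor + 1)
    else menorValor
  else menorValor
termination_by vetor.length - menorValor

def menorValorComp (vetor : List Int) (valorComparado : Int) : Int :=
  let start : Int := menorValorCompWhile vetor valorComparado 0
  -- for i in range(menorValor, len(vetor)): all accesses are in range, so pyGetD's default is never used
  (PySem.List.pyRange start (vetor.length) 1).foldl
    (fun menorValor i =>
      if PySem.List.pyGetD vetor i 0 ≤ PySem.List.pyGetD vetor menorValor 0 ∧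
         valorComparado ≤ PySem.List.pyGetD vetor i 0 then i else menorValor)
    start

-- ===== PORT B =====
def menorValorComp_alt (vetor : List Int) (valorComparado : Int) : Int :=
  -- m = min(v for v in vetor if v >= valorComparado); Python min raises on an empty sequence, excluded by Pre_
  let m : Int := (PySem.List.min? (vetor.filter (fun v => valorComparado ≤ v)) (fun x => x)).getD 0
  -- vetor[::-1]
  let rev : List Int := (PySem.List.slice? vetor none none (-1)).getD []
  -- .index(m); under Pre_, m occurs in vetor, so it never raises
  let j : Nat := (PySem.List.index? rev m).getD 0
  (vetor.length : Int) - 1 - (j : Int)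

-- ===== PRECONDITION & SPEC =====
-- Pre_: some element meets the threshold; otherwise A raises IndexError (and B raises ValueError)
def Pre_menorValorComp (vetor : List Int) (valorComparado : Int) : Prop :=
  ∃ v ∈ vetor, valorComparado ≤ v
instance (vetor : List Int) (valorComparado : Int) : Decidable (Pre_menorValorComp vetor valorComparado) := by
  unfold Pre_menorValorComp; infer_instance
def pvWitness_menorValorComp : List Int × Int := ([3, 1, 2], 1)

def Spec_menorValorComp (vetor : List Int) (valorComparado : Int) (out : Int) : Prop := out = menorValorComp_alt vetor valorComparado
instance (vetor : List Int) (valorComparado : Int) (out : Int) : Decidable (Spec_menorValorComp vetor valorComparado out) := by unfold Spec_menorValorComp; infer_instance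

-- ===== CLAIM (what is proved, stated in full; the proofs are below) =====
def Claim_equal_menorValorComp : Prop := ∀ (vetor : List Int) (valorComparado : Int), Dom_menorValorComp vetor valorComparado → Pre_menorValorComp vetor valorComparado → Spec_menorValorComp vetor valorComparado (menorValorComp vetor valorComparado)

-- ===== LEMMAS AND PROOFS =====

-- the while loop returns the first index ≥ s whose value meets the threshold
theorem while_spec (vetor : List Int) (c : Int)
    (s : Nat) (hex : ∃ q, ∃ hq : q < vetor.length, s ≤ q ∧ c ≤ vetor[q]) :
    ∃ ht : menorValorCompWhile vetor c s < vetor.length,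
      c ≤ vetor[menorValorCompWhile vetor c s] ∧ s ≤ menorValorCompWhile vetor c s ∧
      ∀ i (hi : i < vetor.length), s ≤ i → i < menorValorCompWhile vetor c s → vetor[i] < c := by
  obtain ⟨q, hq, hsq, hcq⟩ := hex
  have hs : s < vetor.length := lt_of_le_of_lt hsq hq
  rw [menorValorCompWhile, dif_pos hs]
  by_cases hvs : vetor[s] < c
  · rw [if_pos hvs]
    have hsq' : s + 1 ≤ q := by
      rcases Nat.eq_or_lt_of_le hsq with h | h
      · subst h; exact absurd hcq (not_le.mpr hvs)
      · omega
    obtain ⟨ht, h1, h2, h3⟩ := while_spec vetor c (s + 1) ⟨q, hq, hsq', hcq⟩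
    exact ⟨ht, h1, by omega, fun i hi hsi hit =>
      if h : s = i then by subst h; exact hvs else h3 i hi (by omega) hit⟩
  · rw [if_neg hvs]
    exact ⟨hs, not_lt.mp hvs, le_refl _, fun i hi hsi hit => absurd hit (by omega)⟩
termination_by vetor.length - s

-- A's for-loop, started strictly after the last occurrence k of the minimum m: no update fires
theorem fold_after (vetor : List Int) (c m : Int) (k : Nat)
    (hmin : ∀ i (hi : i < vetor.length), c ≤ vetor[i] → m ≤ vetor[i])
    (hlast : ∀ i (hi : i < vetor.length), k < i → vetor[i] ≠ m)
    (t : Nat) (hkt : k < t) (a : Nat) (ha : a < vetor.length) (ham : vetor[a] = m) :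
    (PySem.List.pyRange (t : Int) (vetor.length) 1).foldl
      (fun acc i => if PySem.List.pyGetD vetor i 0 ≤ PySem.List.pyGetD vetor acc 0 ∧
          c ≤ PySem.List.pyGetD vetor i 0 then i else acc) (a : Int) = (a : Int) := by
  by_cases hlen : t < vetor.length
  · rw [PySem.List.pyRange_one_cons (by exact_mod_cast hlen), List.foldl_cons]
    have hgt : PySem.List.pyGetD vetor (t : Int) 0 = vetor[t] := by
      rw [PySem.List.pyGetD_natCast]; exact List.getD_eq_getElem _ _ hlen
    have hga : PySem.List.pyGetD vetor (a : Int) 0 = vetor[a] := by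
      rw [PySem.List.pyGetD_natCast]; exact List.getD_eq_getElem _ _ ha
    have hcond : ¬ (PySem.List.pyGetD vetor (t : Int) 0 ≤ PySem.List.pyGetD vetor (a : Int) 0 ∧
        c ≤ PySem.List.pyGetD vetor (t : Int) 0) := by
      rw [hgt, hga, ham]
      rintro ⟨h1, h2⟩
      exact hlast t hlen hkt (le_antisymm h1 (hmin t hlen h2))
    rw [if_neg hcond]
    rw [show ((t : Int) + 1) = ((t + 1 : Nat) : Int) by push_cast; ring]
    exact fold_after vetor c m k hmin hlast (t + 1) (by omega) a ha ham
  · rw [PySem.List.pyRange_one_eq_nil (by exact_mod_cast not_lt.mp hlen)]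
    rfl
termination_by vetor.length - t

-- A's for-loop, started at or before k with a qualifying accumulator, ends exactly at k
theorem fold_before (vetor : List Int) (c m : Int) (k : Nat) (hk : k < vetor.length)
    (hvk : vetor[k] = m) (hcm : c ≤ m)
    (hmin : ∀ i (hi : i < vetor.length), c ≤ vetor[i] → m ≤ vetor[i])
    (hlast : ∀ i (hi : i < vetor.length), k < i → vetor[i] ≠ m)
    (t : Nat) (htk : t ≤ k) (a : Nat) (ha : a < vetor.length) (hca : c ≤ vetor[a]) :
    (PySem.List.pyRange (t : Int) (vetor.length) 1).foldl
      (fun acc i => if PySem.List.pyGetD vetor i 0 ≤ PySem.List.pyGetD vetor acc 0 ∧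
          c ≤ PySem.List.pyGetD vetor i 0 then i else acc) (a : Int) = (k : Int) := by
  have hlen : t < vetor.length := lt_of_le_of_lt htk hk
  rw [PySem.List.pyRange_one_cons (by exact_mod_cast hlen), List.foldl_cons]
  have hgt : PySem.List.pyGetD vetor (t : Int) 0 = vetor[t] := by
    rw [PySem.List.pyGetD_natCast]; exact List.getD_eq_getElem _ _ hlen
  have hga : PySem.List.pyGetD vetor (a : Int) 0 = vetor[a] := by
    rw [PySem.List.pyGetD_natCast]; exact List.getD_eq_getElem _ _ ha
  have hcast : ((t : Int) + 1) = ((t + 1 : Nat) : Int) := by push_cast; ring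
  rcases Nat.eq_or_lt_of_le htk with hEq | hlt
  · subst hEq
    rw [if_pos ⟨by rw [hgt, hga, hvk]; exact hmin a ha hca, by rw [hgt, hvk]; exact hcm⟩]
    rw [hcast]
    exact fold_after vetor c m t hmin hlast (t + 1) (by omega) t hlen hvk
  · by_cases hcond : PySem.List.pyGetD vetor (t : Int) 0 ≤ PySem.List.pyGetD vetor (a : Int) 0 ∧
        c ≤ PySem.List.pyGetD vetor (t : Int) 0
    · rw [if_pos hcond, hcast]
      exact fold_before vetor c m k hk hvk hcm hmin hlast (t + 1) hlt t hlen
        (by rw [← hgt]; exact hcond.2)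
    · rw [if_neg hcond, hcast]
      exact fold_before vetor c m k hk hvk hcm hmin hlast (t + 1) hlt a ha hca
termination_by vetor.length - t

-- ===== VERDICT (by name: the statement is the Claim_ definition above) =====
theorem menorValorComp_spec : Claim_equal_menorValorComp := by
  intro vetor c _ hpre
  unfold Spec_menorValorComp
  obtain ⟨v0, hv0, hc0⟩ := hpre
  -- the minimum mv of the qualifying values
  have hv0f : v0 ∈ vetor.filter (fun v => decide (c ≤ v)) :=
    List.mem_filter.mpr ⟨hv0, by simpa⟩
  obtain ⟨mv, hmv⟩ : ∃ mv,
      PySem.List.min? (vetor.filter (fun v => decide (c ≤ v))) (fun x => x) = some mv := by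
    cases h : PySem.List.min? (vetor.filter (fun v => decide (c ≤ v))) (fun x => x) with
    | none => rw [PySem.List.min?_eq_none_iff] at h; rw [h] at hv0f; cases hv0f
    | some mv => exact ⟨mv, rfl⟩
  have hmvf := PySem.List.min?_mem hmv
  have hmv_mem : mv ∈ vetor := (List.mem_filter.mp hmvf).1
  have hcm : c ≤ mv := by have := (List.mem_filter.mp hmvf).2; simpa using this
  have hmin : ∀ i (hi : i < vetor.length), c ≤ vetor[i] → mv ≤ vetor[i] := by
    intro i hi hci
    exact PySem.List.min?_isMin hmv vetor[i]
      (List.mem_filter.mpr ⟨List.getElem_mem hi, by simpa⟩)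
  -- the last occurrence of mv, via .index on the reversed list
  obtain ⟨j, hj⟩ := Option.isSome_iff_exists.mp
    ((PySem.List.index?_isSome_iff vetor.reverse mv).mpr (List.mem_reverse.mpr hmv_mem))
  obtain ⟨pre, suf, hdec, hlenpre, hnotin⟩ := (PySem.List.index?_eq_some_iff _ _ _).mp hj
  have hvet : vetor = suf.reverse ++ mv :: pre.reverse := by
    have h := congrArg List.reverse hdec
    simpa using h
  have hlen_eq : vetor.length = suf.length + 1 + pre.length := by
    rw [hvet]; simp; omega
  have hk : suf.length < vetor.length := by omega
  have hvk : vetor[suf.length]'hk = mv := by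
    rw [List.getElem_of_eq hvet, List.getElem_append_right (by rw [List.length_reverse])]
    simp
  have hlast : ∀ i (hi : i < vetor.length), suf.length < i → vetor[i] ≠ mv := by
    intro i hi hki
    rw [List.getElem_of_eq hvet, List.getElem_append_right (by rw [List.length_reverse]; omega)]
    rw [List.getElem_cons]
    split
    · next h0 => exfalso; rw [List.length_reverse] at h0; omega
    · intro h
      exact hnotin (List.mem_reverse.mp (h ▸ List.getElem_mem _))
  -- the while loop lands at or before suf.length
  obtain ⟨ht, hct, _, hfirst⟩ :=
    while_spec vetor c 0 ⟨suf.length, hk, Nat.zero_le _, by rw [hvk]; exact hcm⟩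
  have htk : menorValorCompWhile vetor c 0 ≤ suf.length := by
    by_contra h
    exact absurd (hvk ▸ hcm) (not_le.mpr (hfirst suf.length hk (Nat.zero_le _) (by omega)))
  -- evaluate both ports
  simp only [menorValorComp, menorValorComp_alt, PySem.List.slice?_none_none_neg_one,
    Option.getD_some, hmv, hj]
  rw [fold_before vetor c mv suf.length hk hvk hcm hmin hlast
    (menorValorCompWhile vetor c 0) htk (menorValorCompWhile vetor c 0) ht hct]
  rw [hlenpre] at *
  push_cast [hlen_eq]
  ring
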